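-- pv_equiv track=rewrite | github.com/ewooten7/Document-Statistics-Builder_Wk7 | src/word_lib.py | clean_word
-- ===== SOURCE A (Python) =====
-- def clean_word(word: str) -> str:
--     """
--     Recursively removes punctuation from a word, and reduces it to lower case.
--
--     Examples:
--         >>> clean_word('Hello!')
--         'hello'
--         >>> clean_word('World...')
--         'world'
--         >>> clean_word("!!!")
--         ''
--         >>> clean_word("H3ll0!!!")
--         'h3ll0'
--         >>> clean_word("...Python??")
--         'python'
--         >>> clean_word("NeO")
--         'neo'
--
--     See:
--         https://docs.python.org/3/library/stdtypes.html#str.isalnum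
--
--
--     Args:
--         word (str): the word to remove punctuation from
--
--     Returns:
--         str: the word without punctuation
--     """
--     if len(word) == 0:
--         return ""
--
--     first = word[0]
--     rest = word[1:]
--
--     if first.isalnum():
--         return first.lower() + clean_word(rest)
--
--     return clean_word(rest)
-- ===== SOURCE B (Python) =====
-- def clean_word(word: str) -> str:
--     """Iterative re-implementation: explicit accumulator loop instead of recursion."""
--     result = []
--     for ch in word:
--         if ch.isalnum():
--             result.append(ch.lower())
--     return ''.join(result)
-- ===== Notes on version B (the rewrite author's own statement) =====
-- stated objective: simpler
-- what changed: Replaced tail recursion with head/rest slicing by a single explicit accumulator loop over the characters joined at the end.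
import Mathlib
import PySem

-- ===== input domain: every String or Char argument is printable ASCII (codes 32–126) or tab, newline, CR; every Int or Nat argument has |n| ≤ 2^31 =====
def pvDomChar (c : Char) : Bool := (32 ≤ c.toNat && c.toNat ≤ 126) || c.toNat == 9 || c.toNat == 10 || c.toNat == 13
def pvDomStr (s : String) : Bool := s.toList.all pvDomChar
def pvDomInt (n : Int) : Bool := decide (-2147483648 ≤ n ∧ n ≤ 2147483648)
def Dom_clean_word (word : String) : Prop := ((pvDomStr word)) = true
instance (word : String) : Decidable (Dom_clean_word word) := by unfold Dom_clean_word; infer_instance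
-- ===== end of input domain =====

-- ===== PORT A =====
-- A recurses on word[0] / word[1:]; ported as structural recursion on the char list.
def cleanWordRec : List Char → List Char
  | [] => []
  | first :: rest =>
    if PySem.Chars.isalnum first then
      PySem.Chars.lowerChar first :: cleanWordRec rest
    else
      cleanWordRec rest

def clean_word (word : String) : String :=
  String.mk (cleanWordRec word.toList)

-- ===== PORT B =====
-- B is an explicit accumulator loop over the characters, joined at the end.
def clean_word_alt (word : String) : String :=
  String.mk (word.toList.foldl
    (fun acc c => if PySem.Chars.isalnum c then acc ++ [PySem.Chars.lowerChar c] else acc) [])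

-- ===== PRECONDITION & SPEC =====
def Spec_clean_word (word : String) (out : String) : Prop := out = clean_word_alt word
instance (word : String) (out : String) : Decidable (Spec_clean_word word out) := by unfold Spec_clean_word; infer_instance

-- ===== CLAIM (what is proved, stated in full; the proofs are below) =====
def Claim_equal_clean_word : Prop := ∀ (word : String), Dom_clean_word word → Spec_clean_word word (clean_word word)

-- ===== LEMMAS AND PROOFS =====
theorem foldl_clean_eq (l : List Char) (acc : List Char) :
    l.foldl (fun acc c => if PySem.Chars.isalnum c then acc ++ [PySem.Chars.lowerChar c] else acc) acc
      = acc ++ cleanWordRec l := by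
  induction l generalizing acc with
  | nil => simp [cleanWordRec]
  | cons c rest ih =>
    simp only [List.foldl, cleanWordRec]
    by_cases h : PySem.Chars.isalnum c <;> simp [h, ih]

-- ===== VERDICT (by name: the statement is the Claim_ definition above) =====
theorem clean_word_spec : Claim_equal_clean_word := by
  intro word _
  unfold Spec_clean_word clean_word clean_word_alt
  rw [foldl_clean_eq]
  simp
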